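-- pv_equiv track=rewrite | github.com/ahnhongjo/CodingTest | 코딩테스트_파이썬/level2/더 맵겍.py | solution
-- ===== SOURCE A (Python) =====
-- import heapq
--
-- def solution(scoville, K):
--
--     heapq.heapify(scoville)
--     num=0
--
--     while scoville[0]<K and len(scoville)>1:
--         min1=heapq.heappop(scoville)
--         min2=heapq.heappop(scoville)
--         heapq.heappush(scoville,min1+min2*2)
--         num+=1
--
--     if scoville[0]<K:
--         return -1
--
--     return num
-- ===== SOURCE B (Python) =====
-- def _insort(arr, x):
--     i = 0
--     while i < len(arr) and arr[i] <= x: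
--         i += 1
--     arr.insert(i, x)
--
-- def solution(scoville, K):
--     scoville.sort()
--     num = 0
--     while scoville[0] < K and len(scoville) > 1:
--         min1 = scoville.pop(0)
--         min2 = scoville.pop(0)
--         _insort(scoville, min1 + min2 * 2)
--         num += 1
--     if scoville[0] < K:
--         return -1
--     return num
-- ===== Notes on version B (the rewrite author's own statement) =====
-- stated objective: alternative
-- what changed: Replaces the binary heap (heapify/heappop/heappush) by a list sorted once up front, from which the two smallest are popped off the front and the combined value is re-inserted at its sorted position by a linear scan.
import Mathlib
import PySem

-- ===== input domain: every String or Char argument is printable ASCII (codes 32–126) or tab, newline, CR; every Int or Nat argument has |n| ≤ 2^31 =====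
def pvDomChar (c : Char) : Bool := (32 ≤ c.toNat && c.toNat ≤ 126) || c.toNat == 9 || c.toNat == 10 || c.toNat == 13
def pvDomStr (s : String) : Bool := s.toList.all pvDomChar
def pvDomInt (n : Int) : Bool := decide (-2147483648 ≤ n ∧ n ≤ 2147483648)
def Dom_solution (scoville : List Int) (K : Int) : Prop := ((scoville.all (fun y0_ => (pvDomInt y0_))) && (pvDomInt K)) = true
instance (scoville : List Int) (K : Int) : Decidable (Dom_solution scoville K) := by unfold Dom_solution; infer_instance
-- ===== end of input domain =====

-- B replaces A's binary heap by a list sorted once with linear re-insertion; return-value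
-- equivalence only: A heapifies its argument in place, B sorts it in place.

-- ===== PORT A =====
-- A keeps `scoville` as a heapq min-heap: heappop yields the current minimum and heappush
-- re-inserts; the heap is ported value-faithfully as the list with `min?` as the root and
-- `erase` of the minimum as heappop (the stdlib-call allowance; the heap's internal array
-- layout is unobservable through A's return value).
def solGoA (K num : Int) (l : List Int) : Int :=
  match h : l.min? with
  | none => -1  -- unreachable: Pre_ gives a nonempty list, and the loop keeps it nonempty
  | some m =>
    if m < K ∧ 1 < l.length then
      match h2 : (l.erase m).min? with
      | none => -1  -- unreachable: the erased list still has ≥ 1 element here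
      | some m2 => solGoA K (num + 1) ((m + m2 * 2) :: (l.erase m).erase m2)
    else if m < K then -1 else num
termination_by l.length
decreasing_by
  have hm : m ∈ l := List.min?_mem h
  have hm2 : m2 ∈ l.erase m := List.min?_mem h2
  have e1 : (l.erase m).length = l.length - 1 := List.length_erase_of_mem hm
  have e2 : ((l.erase m).erase m2).length = (l.erase m).length - 1 :=
    List.length_erase_of_mem hm2
  simp only [List.length_cons, e2, e1]
  omega

def solution (scoville : List Int) (K : Int) : Int := solGoA K 0 scoville

-- ===== PORT B =====
-- port of Source B's hand-written `_insort`: linear scan for the insertion point (after equals)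
def insortR (x : Int) : List Int → List Int
  | [] => [x]
  | b :: t => if b ≤ x then b :: insortR x t else x :: b :: t

theorem length_insortR (x : Int) (l : List Int) : (insortR x l).length = l.length + 1 := by
  induction l with
  | nil => rfl
  | cons b t ih => simp only [insortR]; split <;> simp [ih]

def solGoB (K num : Int) (arr : List Int) : Int :=
  match arr with
  | [] => -1  -- unreachable: Pre_ gives a nonempty list, and the loop keeps it nonempty
  | a :: rest =>
    if a < K ∧ rest ≠ [] then
      match rest with
      | [] => -1  -- unreachable: rest ≠ [] in this branch
      | b :: rest2 => solGoB K (num + 1) (insortR (a + b * 2) rest2)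
    else if a < K then -1 else num
termination_by arr.length
decreasing_by simp [length_insortR]

def solution_alt (scoville : List Int) (K : Int) : Int :=
  solGoB K 0 (scoville.mergeSort (fun a b => decide (a ≤ b)))

-- ===== PRECONDITION & SPEC =====
-- A raises IndexError (scoville[0]) on the empty list; Pre_ excludes exactly that input.
def Pre_solution (scoville : List Int) (K : Int) : Prop := scoville ≠ []
instance (scoville : List Int) (K : Int) : Decidable (Pre_solution scoville K) := by
  unfold Pre_solution; infer_instance
def pvWitness_solution : List Int × Int := ([1, 2, 3, 9, 10, 12], 7)

def Spec_solution (scoville : List Int) (K : Int) (out : Int) : Prop := out = solution_alt scoville K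
instance (scoville : List Int) (K : Int) (out : Int) : Decidable (Spec_solution scoville K out) := by
  unfold Spec_solution; infer_instance

-- ===== CLAIM (what is proved, stated in full; the proofs are below) =====
def Claim_equal_solution : Prop := ∀ (scoville : List Int) (K : Int), Dom_solution scoville K → Pre_solution scoville K → Spec_solution scoville K (solution scoville K)

-- ===== LEMMAS AND PROOFS =====

theorem sortI_perm (l : List Int) : (l.mergeSort (fun a b => decide (a ≤ b))).Perm l :=
  List.mergeSort_perm l _

theorem sortI_pairwise (l : List Int) :
    List.Pairwise (· ≤ ·) (l.mergeSort (fun a b => decide (a ≤ b))) := by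
  have := List.pairwise_mergeSort (le := fun a b : Int => decide (a ≤ b))
    (fun a b c hab hbc => by simp_all; omega) (fun a b => by simp; omega) l
  exact this.imp (by simp)

theorem sorted_unique {l₁ l₂ : List Int} (h : l₁.Perm l₂)
    (s₁ : List.Pairwise (· ≤ ·) l₁) (s₂ : List.Pairwise (· ≤ ·) l₂) : l₁ = l₂ :=
  List.eq_of_perm_of_sorted (fun a b _ _ hab hba => le_antisymm hab hba) s₁ s₂ h

theorem min?_of_perm_sorted {l : List Int} {a : Int} {rest : List Int}
    (hp : l.Perm (a :: rest)) (hs : List.Pairwise (· ≤ ·) (a :: rest)) :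
    l.min? = some a := by
  rw [List.min?_eq_some_iff]
  constructor
  · exact hp.mem_iff.mpr List.mem_cons_self
  · intro b hb
    rcases List.mem_cons.mp (hp.mem_iff.mp hb) with h | h
    · omega
    · exact (List.pairwise_cons.mp hs).1 b h

theorem insortR_perm (x : Int) (l : List Int) : (insortR x l).Perm (x :: l) := by
  induction l with
  | nil => rfl
  | cons b t ih =>
    simp only [insortR]
    split
    · exact (ih.cons b).trans (List.Perm.swap x b t)
    · rfl

theorem insortR_pairwise (x : Int) {l : List Int} (hs : List.Pairwise (· ≤ ·) l) :
    List.Pairwise (· ≤ ·) (insortR x l) := by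
  induction l with
  | nil => simp [insortR]
  | cons b t ih =>
    rcases List.pairwise_cons.mp hs with ⟨hb, ht⟩
    simp only [insortR]
    split
    · rename_i hbx
      refine List.pairwise_cons.mpr ⟨?_, ih ht⟩
      intro y hy
      rcases List.mem_cons.mp ((insortR_perm x t).mem_iff.mp hy) with h | h
      · omega
      · exact hb y h
    · rename_i hbx
      refine List.pairwise_cons.mpr ⟨?_, hs⟩
      intro y hy
      rcases List.mem_cons.mp hy with h | h
      · omega
      · have := hb y h; omega

theorem erase_perm_of_perm_cons {l : List Int} {a : Int} {rest : List Int}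
    (hp : l.Perm (a :: rest)) : (l.erase a).Perm rest := by
  have := hp.erase a
  simpa using this

theorem exit_case (K num : Int) (l : List Int) (m : Int)
    (h : l.min? = some m) (hif : ¬ (m < K ∧ 1 < l.length)) (hne : l ≠ []) :
    solGoA K num l = solGoB K num (l.mergeSort (fun a b => decide (a ≤ b))) := by
  set s := l.mergeSort (fun a b : Int => decide (a ≤ b)) with hs
  have hperm : s.Perm l := sortI_perm l
  have hpw : List.Pairwise (· ≤ ·) s := sortI_pairwise l
  have hslen : s.length = l.length := hperm.length_eq
  obtain ⟨a, rest, hsl⟩ : ∃ a rest, s = a :: rest := by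
    match hsm : s, hslen with
    | [], e =>
      exfalso; apply hne
      cases l with
      | nil => rfl
      | cons x t => simp at e
    | a :: rest, _ => exact ⟨a, rest, rfl⟩
  rw [hsl] at hperm hpw
  have hma : m = a := by
    have := min?_of_perm_sorted (l := l) hperm.symm hpw
    rw [h] at this; exact Option.some.inj this
  have hrest : (rest ≠ []) ↔ 1 < l.length := by
    have hl : l.length = rest.length + 1 := by
      rw [← hperm.length_eq]; simp
    constructor
    · intro hr; have := List.length_pos_iff.mpr hr; omega
    · intro hr hc; rw [hc] at hl; simp at hl; omega
  rw [solGoA.eq_def]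
  split
  next heq => simp [heq] at h
  next m' heq =>
    have hm' : m' = m := by rw [heq] at h; exact Option.some.inj h
    subst hm'
    rw [if_neg hif]
    conv_rhs => rw [solGoB.eq_def]
    rw [hsl]
    have hcond : ¬ (a < K ∧ rest ≠ []) := by
      rw [hma] at hif; rw [hrest]; exact hif
    simp only [hma]
    simp [hcond]

theorem main_loop (K : Int) : ∀ (num : Int) (l : List Int), l ≠ [] →
    solGoA K num l = solGoB K num (l.mergeSort (fun a b => decide (a ≤ b))) := by
  intro num l
  induction num, l using solGoA.induct K with
  | case1 num l h =>
    intro hne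
    exact absurd (List.min?_eq_none_iff.mp h) hne
  | case2 num l m h hif hm2 =>
    -- dead branch: (l.erase m).min? = none is impossible when 1 < l.length
    intro hne; exfalso
    obtain ⟨_, hlen⟩ := hif
    have hm : m ∈ l := List.min?_mem h
    have he : (l.erase m).length = l.length - 1 := List.length_erase_of_mem hm
    have hnil : l.erase m = [] := List.min?_eq_none_iff.mp hm2
    rw [hnil] at he; simp at he; omega
  | case3 num l m h hif m2 h2 ih =>
    intro hne
    obtain ⟨hmK, hlen⟩ := hif
    set s := l.mergeSort (fun a b : Int => decide (a ≤ b)) with hs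
    have hperm : s.Perm l := sortI_perm l
    have hpw : List.Pairwise (· ≤ ·) s := sortI_pairwise l
    have hslen : s.length = l.length := hperm.length_eq
    obtain ⟨a, b, rest2, hsl⟩ : ∃ a b rest2, s = a :: b :: rest2 := by
      match hsm : s, hslen with
      | [], e => simp [← e] at hlen
      | [a], e => simp at e; omega
      | a :: b :: rest2, _ => exact ⟨a, b, rest2, rfl⟩
    rw [hsl] at hperm hpw
    have hma : m = a := by
      have := min?_of_perm_sorted (l := l) hperm.symm hpw
      rw [h] at this; exact Option.some.inj this
    have herase1 : (l.erase m).Perm (b :: rest2) := by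
      rw [hma]; exact erase_perm_of_perm_cons hperm.symm
    have hm2b : m2 = b := by
      have := min?_of_perm_sorted herase1 (List.pairwise_cons.mp hpw).2
      rw [h2] at this; exact Option.some.inj this
    have herase2 : ((l.erase m).erase m2).Perm rest2 := by
      rw [hm2b]; exact erase_perm_of_perm_cons herase1
    have hpw2 : List.Pairwise (· ≤ ·) (b :: rest2) := (List.pairwise_cons.mp hpw).2
    -- the recursive states are equal as sorted lists
    have hkey : ((m + m2 * 2) :: (l.erase m).erase m2).mergeSort (fun a b => decide (a ≤ b))
        = insortR (a + b * 2) rest2 := by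
      apply sorted_unique _ (sortI_pairwise _)
        (insortR_pairwise _ (List.pairwise_cons.mp hpw2).2)
      refine (sortI_perm _).trans ?_
      refine ((herase2.cons _).trans ?_).trans (insortR_perm (a + b * 2) rest2).symm
      rw [hma, hm2b]
    -- reduce A one step
    rw [solGoA.eq_def]
    split
    next heq => simp [heq] at h
    next m' heq =>
      have hm' : m' = m := by rw [heq] at h; exact Option.some.inj h
      subst hm'
      rw [if_pos ⟨hmK, hlen⟩]
      split
      next heq2 => simp [heq2] at h2
      next m2' heq2 =>
        have hm2' : m2' = m2 := by rw [heq2] at h2; exact Option.some.inj h2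
        subst hm2'
        rw [ih (by simp), hkey]
        -- reduce B one step
        conv_rhs => rw [solGoB.eq_def]
        rw [hsl]
        have hcond : a < K ∧ (b :: rest2) ≠ [] := ⟨hma ▸ hmK, by simp⟩
        simp [hcond]
  | case4 num l m h hif hmK =>
    intro hne
    exact exit_case K num l m h hif hne
  | case5 num l m h hif hmK =>
    intro hne
    exact exit_case K num l m h hif hne

-- ===== VERDICT (by name: the statement is the Claim_ definition above) =====
theorem solution_spec : Claim_equal_solution := by
  intro scoville K _ hpre
  unfold Spec_solution solution solution_alt
  exact main_loop K 0 scoville hpre
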